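-- pv_equiv track=rewrite | github.com/jquiaot/glowing-winner-leetcode | leetcode/2486__append_characters_to_string_to_make_subsequence.py | appendCharacters1
-- ===== SOURCE A (Python) =====
-- def appendCharacters1(s: str, t: str) -> int:
--     """
--     Iterate through s, finding letters of t that match. If we exhaust
--     all letters of t, then we've found all the characters of t in
--     s in the order found in t, and so ti will equal len(t), and as
--     expected we should return 0 (t is a subsequence of s). If, however,
--     we didn't find all letters of t in s, then the difference between
--     the length of t and the number of letters we found should be the
--     number of chars we need to append to s to get t to be a subsequence.
--
--     Time:
--     - m = len(s), n = len(t)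
--     - O(m + n) to iterate through s and t to find subsequence and
--       missing chars
--     - => O(m + n)
--
--     Space:
--     - => O(1) aux space for s and t pointers
--     """
--     si = 0
--     ti = 0
--     while si < len(s) and ti < len(t):
--         if s[si] == t[ti]:
--             ti += 1
--         si += 1
--     return len(t) - ti
-- ===== SOURCE B (Python) =====
-- def appendCharacters1(s: str, t: str) -> int:
--     # "Is t[:k] a subsequence of s?" is monotone in k, so binary-search the
--     # largest such k and return len(t) - k.
--     def is_subseq(k: int) -> bool:
--         it = iter(s)
--         return all(c in it for c in t[:k])
--
--     lo, hi = 0, len(t)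
--     while lo < hi:
--         mid = (lo + hi + 1) // 2
--         if is_subseq(mid):
--             lo = mid
--         else:
--             hi = mid - 1
--     return len(t) - lo
-- ===== Notes on version B (the rewrite author's own statement) =====
-- stated objective: alternative
-- what changed: B binary-searches the largest k for which t[:k] is a subsequence of s (each probe an independent greedy subsequence test, exploiting monotonicity of the property in k), instead of A's single two-pointer pass; correct because the greedy pass matches exactly the longest matchable prefix of t.
import Mathlib
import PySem

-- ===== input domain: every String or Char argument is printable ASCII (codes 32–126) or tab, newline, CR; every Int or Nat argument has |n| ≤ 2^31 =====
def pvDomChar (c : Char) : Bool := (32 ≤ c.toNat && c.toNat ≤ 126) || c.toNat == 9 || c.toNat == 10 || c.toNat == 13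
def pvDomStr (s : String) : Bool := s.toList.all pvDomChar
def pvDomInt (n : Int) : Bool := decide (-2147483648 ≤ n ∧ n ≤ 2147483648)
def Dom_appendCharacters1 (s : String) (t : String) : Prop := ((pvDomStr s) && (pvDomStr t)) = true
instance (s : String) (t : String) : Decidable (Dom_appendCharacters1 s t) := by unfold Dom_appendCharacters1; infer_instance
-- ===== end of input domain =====

-- B replaces A's single greedy two-pointer pass by a binary search for the largest k with
-- t[:k] a subsequence of s (each probe an independent subsequence test); same return value.

-- ===== PORT A =====
-- A's while loop over si/ti, transcribed as structural recursion on s's chars carrying t's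
-- unmatched suffix; returns ti (the number of matched characters of t).
def pvLoopA : List Char → List Char → Int
  | _, [] => 0
  | [], _ :: _ => 0
  | c :: s, d :: t => if c = d then 1 + pvLoopA s t else pvLoopA s (d :: t)

def appendCharacters1 (s : String) (t : String) : Int :=
  (t.toList.length : Int) - pvLoopA s.toList t.toList

-- ===== PORT B =====
-- 'c in it': drop characters of s until c is found; none = iterator exhausted.
def pvFindDrop (ch : Char) : List Char → Option (List Char)
  | [] => none
  | c :: s => if c = ch then some s else pvFindDrop ch s

-- is_subseq: 'all(c in it for c in u)' over the prefix u = t[:k]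
def pvIsSub : List Char → List Char → Bool
  | _, [] => true
  | s, c :: u =>
    match pvFindDrop c s with
    | none => false
    | some s' => pvIsSub s' u

-- the while lo < hi binary-search loop of Source B
def pvBSearch (P : Nat → Bool) (lo hi : Nat) : Nat :=
  if _h : lo < hi then
    let mid := (lo + hi + 1) / 2
    if P mid then pvBSearch P mid hi else pvBSearch P lo (mid - 1)
  else lo
termination_by hi - lo
decreasing_by
  · omega
  · omega

def appendCharacters1_alt (s : String) (t : String) : Int :=
  (t.toList.length : Int) -
    (pvBSearch (fun k => pvIsSub s.toList (t.toList.take k)) 0 t.toList.length : Int)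

-- ===== PRECONDITION & SPEC =====
def Spec_appendCharacters1 (s : String) (t : String) (out : Int) : Prop := out = appendCharacters1_alt s t
instance (s : String) (t : String) (out : Int) : Decidable (Spec_appendCharacters1 s t out) := by unfold Spec_appendCharacters1; infer_instance

-- ===== CLAIM (what is proved, stated in full; the proofs are below) =====
def Claim_equal_appendCharacters1 : Prop := ∀ (s : String) (t : String), Dom_appendCharacters1 s t → Spec_appendCharacters1 s t (appendCharacters1 s t)

-- ===== LEMMAS AND PROOFS =====

-- Nat-valued version of A's greedy matched count, for arithmetic.
def pvGN : List Char → List Char → Nat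
  | _, [] => 0
  | [], _ :: _ => 0
  | c :: s, d :: t => if c = d then 1 + pvGN s t else pvGN s (d :: t)

lemma pvLoopA_eq_gN : ∀ (s t : List Char), pvLoopA s t = (pvGN s t : Int) := by
  intro s
  induction s with
  | nil => intro t; cases t <;> rfl
  | cons c s ih =>
    intro t
    cases t with
    | nil => rfl
    | cons d t =>
      by_cases h : c = d
      · simp [pvLoopA, pvGN, h, ih]
      · simp [pvLoopA, pvGN, h, ih]

lemma pvGN_nil_t (s : List Char) : pvGN s [] = 0 := by cases s <;> rfl

lemma pvGN_le_length : ∀ (s t : List Char), pvGN s t ≤ t.length := by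
  intro s
  induction s with
  | nil => intro t; cases t <;> simp [pvGN]
  | cons c s ih =>
    intro t
    cases t with
    | nil => simp [pvGN]
    | cons d t =>
      by_cases h : c = d
      · simp only [pvGN, List.length_cons, if_pos h]
        have := ih t; omega
      · simp only [pvGN, List.length_cons, if_neg h]
        have := ih (d :: t); simp at this; omega

-- greedy count of a prefix: pvGN s (t.take k) = min k (pvGN s t)
lemma pvGN_take : ∀ (s t : List Char) (k : Nat), pvGN s (t.take k) = min k (pvGN s t) := by
  intro s
  induction s with
  | nil =>
    intro t k
    cases h : t.take k <;> cases t <;> simp_all [pvGN]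
  | cons c s ih =>
    intro t k
    cases t with
    | nil => simp [pvGN_nil_t]
    | cons d t =>
      cases k with
      | zero => simp [pvGN_nil_t]
      | succ k =>
        by_cases h : c = d
        · simp only [List.take_succ_cons, pvGN, if_pos h, ih]
          omega
        · simp only [List.take_succ_cons, pvGN, if_neg h]
          have := ih (d :: t) (k + 1)
          simpa using this

-- the iterator-consuming greedy count, matching pvGN
lemma pvGN_cons (ch : Char) (t : List Char) :
    ∀ s : List Char, pvGN s (ch :: t) =
      match pvFindDrop ch s with
      | none => 0
      | some s' => 1 + pvGN s' t := by
  intro s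
  induction s with
  | nil => rfl
  | cons c s ih =>
    by_cases h : c = ch
    · simp [pvGN, pvFindDrop, h]
    · simp [pvGN, pvFindDrop, h, ih]

lemma pvIsSub_eq : ∀ (u s : List Char), pvIsSub s u = decide (pvGN s u = u.length) := by
  intro u
  induction u with
  | nil => intro s; simp [pvIsSub, pvGN_nil_t]
  | cons c u ih =>
    intro s
    rw [show pvIsSub s (c :: u) =
          (match pvFindDrop c s with
           | none => false
           | some s' => pvIsSub s' u) from rfl]
    rw [pvGN_cons]
    cases h : pvFindDrop c s with
    | none => simp
    | some s' =>
      simp only [ih s', List.length_cons]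
      rw [decide_eq_decide]
      exact ⟨fun h' => by rw [h', Nat.add_comm],
             fun h' => by rw [Nat.add_comm] at h'; exact Nat.add_right_cancel h'⟩

-- binary-search correctness against an exact threshold predicate
lemma pvBSearch_eq (P : Nat → Bool) (N : Nat) :
    ∀ (d lo hi : Nat), hi - lo ≤ d →
      (∀ k, lo ≤ k → k ≤ hi → P k = decide (k ≤ N)) →
      lo ≤ N → N ≤ hi → pvBSearch P lo hi = N := by
  intro d
  induction d with
  | zero =>
    intro lo hi hd _ h1 h2
    rw [pvBSearch]
    have h : ¬ lo < hi := by omega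
    simp only [h, dite_false]
    omega
  | succ d ih =>
    intro lo hi hd h3 h1 h2
    rw [pvBSearch]
    by_cases h : lo < hi
    · simp only [h, dite_true]
      have hmid1 : lo < (lo + hi + 1) / 2 := by omega
      have hmid2 : (lo + hi + 1) / 2 ≤ hi := by omega
      have hp := h3 ((lo + hi + 1) / 2) (by omega) hmid2
      by_cases hpm : (lo + hi + 1) / 2 ≤ N
      · rw [hp, decide_eq_true_eq.mpr hpm]
        exact ih ((lo + hi + 1) / 2) hi (by omega)
          (fun k hk1 hk2 => h3 k (by omega) hk2) hpm h2
      · rw [hp]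
        have : decide ((lo + hi + 1) / 2 ≤ N) = false := by
          simp [hpm]
        rw [this]
        simp only [Bool.false_eq_true, if_false]
        exact ih lo ((lo + hi + 1) / 2 - 1) (by omega)
          (fun k hk1 hk2 => h3 k hk1 (by omega)) h1 (by omega)
    · simp only [h, dite_false]
      omega

lemma pvBSearch_finds (s t : List Char) :
    pvBSearch (fun k => pvIsSub s (t.take k)) 0 t.length = pvGN s t := by
  apply pvBSearch_eq _ (pvGN s t) t.length
  · omega
  · intro k _ hk
    rw [pvIsSub_eq, decide_eq_decide, pvGN_take, List.length_take]
    have := pvGN_le_length s t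
    omega
  · omega
  · exact pvGN_le_length s t

-- ===== VERDICT (by name: the statement is the Claim_ definition above) =====
theorem appendCharacters1_spec : Claim_equal_appendCharacters1 := by
  intro s t _
  unfold Spec_appendCharacters1 appendCharacters1 appendCharacters1_alt
  rw [pvLoopA_eq_gN, pvBSearch_finds]
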